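-- pv_equiv track=rewrite | github.com/Orenmc/Nueral-Nets | Speech-Processing-Recognition/ex4/ass4.py | reduced_prediction
-- ===== SOURCE A (Python) =====
-- def reduced_prediction(words):
--     """
--     reduced repetitions and blanks
--     :param words:
--     :return:
--     """
--     reduced = []
--     for word in words:
--         last = w = ""
--         for letter in word:
--             if letter != "#" and last != letter:
--                 w += letter
--             last = letter
--         reduced.append(w)
--     return reduced
-- ===== SOURCE B (Python) =====
-- def _squash(word):
--     # run-skipping: repeatedly chop the whole leading run off the remaining suffix
--     out = []
--     while word:
--         c = word[0]
--         if c != '#':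
--             out.append(c)
--         word = word.lstrip(c)
--     return ''.join(out)
--
-- def reduced_prediction(words):
--     return [_squash(word) for word in words]
-- ===== Notes on version B (the rewrite author's own statement) =====
-- stated objective: alternative
-- what changed: Replaces A's character-by-character scan with a previous-letter variable by a run-skipping loop: while the suffix is nonempty, take its first character (kept unless '#') and chop the entire leading run off with str.lstrip, so no per-character state is maintained.
import Mathlib
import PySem

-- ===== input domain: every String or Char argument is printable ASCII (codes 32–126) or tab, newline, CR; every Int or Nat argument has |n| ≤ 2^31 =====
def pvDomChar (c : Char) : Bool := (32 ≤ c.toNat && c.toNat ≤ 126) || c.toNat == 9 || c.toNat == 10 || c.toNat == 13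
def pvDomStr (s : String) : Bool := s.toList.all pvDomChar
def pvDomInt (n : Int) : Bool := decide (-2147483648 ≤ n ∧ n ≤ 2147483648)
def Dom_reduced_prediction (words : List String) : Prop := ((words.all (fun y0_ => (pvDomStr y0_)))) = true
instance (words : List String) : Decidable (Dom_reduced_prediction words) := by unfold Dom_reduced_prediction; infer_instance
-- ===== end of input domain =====

-- B replaces A's per-character scan with prev-letter state by a run-skipping loop
-- (lstrip the whole leading run each step): alternative decomposition, same cost.

-- ===== PORT A =====
-- inner loop of A: state is (last, w); Python's initial last = "" equals no 1-char
-- letter string, so it is modelled exactly by `none : Option Char`.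
def pvGoA : List Char → Option Char → List Char → List Char
  | [], _, w => w
  | c :: t, last, w =>
      pvGoA t (some c) (if c ≠ '#' ∧ last ≠ some c then w ++ [c] else w)

def reduced_prediction (words : List String) : List String :=
  words.foldl (fun reduced word => reduced ++ [String.mk (pvGoA word.toList none [])]) []

-- ===== PORT B =====
-- Source B's while loop over the remaining suffix; word.lstrip(c) on the suffix c::t
-- is exactly t.dropWhile (· == c).
def pvSquash : List Char → List Char → List Char
  | [], out => out
  | c :: t, out => pvSquash (t.dropWhile (· == c)) (if c ≠ '#' then out ++ [c] else out)
termination_by l out => l.length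
decreasing_by
  simpa using Nat.lt_succ_of_le (List.length_dropWhile_le (· == c) t)

def reduced_prediction_alt (words : List String) : List String :=
  words.map (fun word => String.mk (pvSquash word.toList []))

-- ===== PRECONDITION & SPEC =====
def Spec_reduced_prediction (words : List String) (out : List String) : Prop := out = reduced_prediction_alt words
instance (words : List String) (out : List String) : Decidable (Spec_reduced_prediction words out) := by unfold Spec_reduced_prediction; infer_instance

-- ===== CLAIM (what is proved, stated in full; the proofs are below) =====
def Claim_equal_reduced_prediction : Prop := ∀ (words : List String), Dom_reduced_prediction words → Spec_reduced_prediction words (reduced_prediction words)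

-- ===== LEMMAS AND PROOFS =====

-- accumulator lemma for B's loop
theorem pvSquash_acc (l : List Char) : ∀ (out : List Char),
    pvSquash l out = out ++ pvSquash l [] := by
  induction hn : l.length using Nat.strong_induction_on generalizing l with
  | _ n ih =>
    cases l with
    | nil => intro out; simp [pvSquash]
    | cons c t =>
        have hlen : (t.dropWhile (· == c)).length < n := by
          subst hn; simpa using Nat.lt_succ_of_le (List.length_dropWhile_le (· == c) t)
        intro out
        by_cases hc : c = '#'
        · subst hc
          simp only [pvSquash, ne_eq, not_true_eq_false, if_false]
          exact ih _ hlen _ rfl _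
        · simp only [pvSquash, hc, ne_eq, not_false_iff, if_true, List.nil_append]
          rw [ih _ hlen _ rfl (out ++ [c]), ih _ hlen _ rfl [c], List.append_assoc]

-- after having just read character c, A's remaining work equals B's run-skipping
-- result on the suffix with the leading run of c's dropped
theorem pvGoA_some (l : List Char) : ∀ (c : Char) (w : List Char),
    pvGoA l (some c) w = w ++ pvSquash (l.dropWhile (· == c)) [] := by
  induction l with
  | nil => intro c w; simp [pvGoA, pvSquash]
  | cons d t ih =>
      intro c w
      by_cases hdc : d = c
      · subst hdc
        simp [pvGoA, List.dropWhile, ih d w]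
      · have hne : (d == c) = false := by simp [hdc]
        simp only [List.dropWhile, hne, pvSquash]
        by_cases hd : d = '#'
        · subst hd
          simp [pvGoA, ih '#' w]
        · simp only [pvGoA, hd, ne_eq, not_false_iff, true_and, if_true]
          rw [if_pos (show ¬ (some c = some d) from fun h => hdc (Option.some.inj h).symm),
            ih d (w ++ [d])]
          simp only [List.nil_append]
          rw [pvSquash_acc (List.dropWhile (· == d) t) [d]]
          simp

theorem pvGoA_none (l : List Char) :
    pvGoA l none [] = pvSquash l [] := by
  cases l with
  | nil => simp [pvGoA, pvSquash]
  | cons c t =>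
      by_cases hc : c = '#'
      · subst hc; simp [pvGoA, pvSquash, pvGoA_some t '#' []]
      · simp only [pvGoA, hc, ne_eq, not_false_iff, true_and, if_true,
          List.nil_append, reduceCtorEq]
        rw [pvGoA_some t c [c]]
        conv_rhs => rw [pvSquash]
        simp only [hc, ne_eq, not_false_iff, if_true, List.nil_append]
        rw [pvSquash_acc (List.dropWhile (· == c) t) [c]]

-- ===== VERDICT (by name: the statement is the Claim_ definition above) =====
theorem reduced_prediction_spec : Claim_equal_reduced_prediction := by
  intro words _
  unfold Spec_reduced_prediction reduced_prediction reduced_prediction_alt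
  rw [PySem.List.foldl_append_singleton_eq_map]
  exact List.map_congr_left (fun w _ => by rw [pvGoA_none])
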